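-- pv_equiv track=rewrite | github.com/evieffvy/market-apriori | main.py | create_C1
-- ===== SOURCE A (Python) =====
-- def create_C1(dataset):
--     """สร้าง Candidate 1-itemsets จากทุก item ที่ปรากฏใน dataset"""
--     C1 = []
--     for transaction in dataset:
--         for item in transaction:
--             if [item] not in C1:
--                 C1.append([item])
--     C1.sort()
--     return list(map(frozenset, C1))
-- ===== SOURCE B (Python) =====
-- def create_C1(dataset):
--     """สร้าง Candidate 1-itemsets จากทุก item ที่ปรากฏใน dataset"""
--     items = []
--     for transaction in dataset:
--         items.extend(transaction)
--     items.sort()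
--     result = []
--     prev = None
--     for x in items:
--         if prev is None or x != prev:
--             result.append(frozenset([x]))
--         prev = x
--     return result
-- ===== Notes on version B (the rewrite author's own statement) =====
-- stated objective: faster
-- what changed: Instead of a per-item linear membership scan over the growing candidate list, B flattens all items, sorts the multiset once, and coalesces adjacent duplicates in a single linear pass.
import Mathlib
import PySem

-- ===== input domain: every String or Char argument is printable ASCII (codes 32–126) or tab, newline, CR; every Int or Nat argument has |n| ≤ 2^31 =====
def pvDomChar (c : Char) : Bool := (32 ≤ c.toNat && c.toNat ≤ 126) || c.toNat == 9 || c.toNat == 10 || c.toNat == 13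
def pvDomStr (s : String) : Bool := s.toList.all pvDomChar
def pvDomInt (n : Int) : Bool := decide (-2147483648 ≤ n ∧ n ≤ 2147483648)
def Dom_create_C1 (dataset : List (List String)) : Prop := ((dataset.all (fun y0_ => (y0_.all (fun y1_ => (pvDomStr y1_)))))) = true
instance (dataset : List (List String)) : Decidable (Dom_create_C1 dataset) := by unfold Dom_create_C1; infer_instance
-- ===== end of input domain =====

-- B flattens all items, sorts once, and coalesces adjacent duplicates in one pass, instead of A's per-insert membership scan.


-- ===== PORT A =====
-- frozenset(l) for a singleton list l is that singleton as a set: PySem.Set.ofList l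
def create_C1 (dataset : List (List String)) : List (List String) :=
  let C1 : List (List String) :=
    dataset.foldl (fun C1 transaction =>
      transaction.foldl (fun C1 item =>
        if [item] ∈ C1 then C1 else C1 ++ [[item]]) C1) []
  (PySem.List.sorted C1 (fun x => x) false).map (fun x => PySem.Set.ofList x)

-- ===== PORT B =====
-- the single pass over the sorted multiset: prev is None  ∨  x ≠ prev  → emit frozenset([x]); prev := x
def pvCoalesce : Option String → List String → List (List String)
  | _, [] => []
  | none, x :: xs => [x] :: pvCoalesce (some x) xs
  | some p, x :: xs => if x = p then pvCoalesce (some x) xs else [x] :: pvCoalesce (some x) xs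

def create_C1_alt (dataset : List (List String)) : List (List String) :=
  let items : List String := dataset.foldl (fun acc transaction => acc ++ transaction) []
  let s := PySem.List.sorted items (fun x => x) false
  pvCoalesce none s

-- ===== PRECONDITION & SPEC =====
def Spec_create_C1 (dataset : List (List String)) (out : List (List String)) : Prop := out = create_C1_alt dataset
instance (dataset : List (List String)) (out : List (List String)) : Decidable (Spec_create_C1 dataset out) := by unfold Spec_create_C1; infer_instance

-- ===== CLAIM (what is proved, stated in full; the proofs are below) =====
def Claim_equal_create_C1 : Prop := ∀ (dataset : List (List String)), Dom_create_C1 dataset → Spec_create_C1 dataset (create_C1 dataset)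

-- ===== LEMMAS AND PROOFS =====

-- [a] < [b] on lists iff a < b on strings
theorem pv_singleton_lt {a b : String} : ([a] : List String) < [b] ↔ a < b := by
  constructor
  · intro h
    rcases (List.lt_iff_lex_lt _ _).mp h with h
    cases h with
    | cons h => cases h
    | rel h => exact h
  · intro h; exact (List.lt_iff_lex_lt _ _).mpr (List.Lex.rel h)

-- A's inner loop over mapped singletons is Set.add on the underlying strings
theorem pv_stepA (t : List String) (L : List String) :
    t.foldl (fun C1 item => if [item] ∈ C1 then C1 else C1 ++ [[item]])
      (L.map (fun s => [s]))
    = (t.foldl (fun L item => PySem.Set.add L item) L).map (fun s => [s]) := by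
  induction t generalizing L with
  | nil => rfl
  | cons x xs ih =>
    have hmem : ([x] ∈ L.map (fun s => ([s] : List String))) ↔ x ∈ L := by simp
    rw [List.foldl_cons, List.foldl_cons]
    by_cases hx : x ∈ L
    · have hadd : PySem.Set.add L x = L := by
        simp [PySem.Set.add, PySem.Set.contains, hx]
      rw [if_pos (hmem.mpr hx), hadd]; exact ih L
    · have hadd : PySem.Set.add L x = L ++ [x] := by
        simp [PySem.Set.add, PySem.Set.contains, hx]
      rw [if_neg (fun h => hx (hmem.mp h)), hadd]
      simpa using ih (L ++ [x])

-- A's double loop builds set(flatten dataset), mapped to singletons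
theorem pv_buildA (ds : List (List String)) (L : List String) :
    ds.foldl (fun C1 transaction =>
        transaction.foldl (fun C1 item =>
          if [item] ∈ C1 then C1 else C1 ++ [[item]]) C1)
      (L.map (fun s => [s]))
    = (ds.flatten.foldl (fun L item => PySem.Set.add L item) L).map (fun s => [s]) := by
  induction ds generalizing L with
  | nil => rfl
  | cons t ds ih =>
    simp only [List.foldl_cons, List.flatten_cons, List.foldl_append]
    rw [pv_stepA, ih]

theorem pv_flatten_foldl (ds : List (List String)) (acc : List String) :
    ds.foldl (fun acc t => acc ++ t) acc = acc ++ ds.flatten := by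
  induction ds generalizing acc with
  | nil => simp
  | cons t ds ih => simp [ih, List.append_assoc]

-- the coalescing pass on a ≤-sorted list with lower bound p emits exactly the distinct values ≠ p, strictly increasing
theorem pv_coalesce_some (s : List String) (p : String)
    (hs : s.Pairwise (fun a b => a ≤ b)) (hp : ∀ y ∈ s, p ≤ y) :
    ∃ r : List String, pvCoalesce (some p) s = r.map (fun x => [x]) ∧
      (p :: r).Pairwise (fun a b => a < b) ∧ (∀ x, x ∈ r ↔ x ∈ s ∧ x ≠ p) := by
  induction s generalizing p with
  | nil => exact ⟨[], rfl, by simp, by simp⟩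
  | cons x xs ih =>
    have hs' := (List.pairwise_cons.mp hs).2
    have hx_le := (List.pairwise_cons.mp hs).1
    by_cases hxp : x = p
    · subst hxp
      obtain ⟨r, h1, h2, h3⟩ := ih x hs' hx_le
      refine ⟨r, by simp [pvCoalesce, h1], h2, ?_⟩
      intro y
      constructor
      · intro hy
        exact ⟨List.mem_cons.mpr (Or.inr ((h3 y).mp hy).1), ((h3 y).mp hy).2⟩
      · rintro ⟨hy, hne⟩
        rcases List.mem_cons.mp hy with rfl | hy
        · exact absurd rfl hne
        · exact (h3 y).mpr ⟨hy, hne⟩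
    · have hplt : p < x := lt_of_le_of_ne (hp x List.mem_cons_self) (Ne.symm hxp)
      obtain ⟨r, h1, h2, h3⟩ := ih x hs' hx_le
      refine ⟨x :: r, by simp [pvCoalesce, hxp, h1], ?_, ?_⟩
      · refine List.pairwise_cons.mpr ⟨?_, h2⟩
        intro y hy
        rcases List.mem_cons.mp hy with rfl | hy
        · exact hplt
        · exact lt_trans hplt ((List.pairwise_cons.mp h2).1 y hy)
      · intro y
        constructor
        · intro hy
          rcases List.mem_cons.mp hy with rfl | hy
          · exact ⟨List.mem_cons_self, fun h => hxp h⟩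
          · obtain ⟨hmem, hne⟩ := (h3 y).mp hy
            refine ⟨List.mem_cons.mpr (Or.inr hmem), ?_⟩
            intro h
            subst h
            exact absurd (lt_trans hplt ((List.pairwise_cons.mp h2).1 y hy)) (lt_irrefl y)
        · rintro ⟨hy, hne⟩
          rcases List.mem_cons.mp hy with rfl | hy
          · exact List.mem_cons_self
          · by_cases hyx : y = x
            · subst hyx; exact List.mem_cons_self
            · exact List.mem_cons.mpr (Or.inr ((h3 y).mpr ⟨hy, hyx⟩))

theorem pv_coalesce_none (s : List String) (hs : s.Pairwise (fun a b => a ≤ b)) :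
    ∃ r : List String, pvCoalesce none s = r.map (fun x => [x]) ∧
      r.Pairwise (fun a b => a < b) ∧ (∀ x, x ∈ r ↔ x ∈ s) := by
  cases s with
  | nil => exact ⟨[], rfl, by simp, by simp⟩
  | cons x xs =>
    have hs' := (List.pairwise_cons.mp hs).2
    have hx_le := (List.pairwise_cons.mp hs).1
    obtain ⟨r, h1, h2, h3⟩ := pv_coalesce_some xs x hs' hx_le
    refine ⟨x :: r, by simp [pvCoalesce, h1], h2, ?_⟩
    intro y
    constructor
    · intro hy
      rcases List.mem_cons.mp hy with rfl | hy
      · exact List.mem_cons_self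
      · exact List.mem_cons.mpr (Or.inr ((h3 y).mp hy).1)
    · intro hy
      rcases List.mem_cons.mp hy with rfl | hy
      · exact List.mem_cons_self
      · by_cases hyx : y = x
        · subst hyx; exact List.mem_cons_self
        · exact List.mem_cons.mpr (Or.inr ((h3 y).mpr ⟨hy, hyx⟩))

-- the two inferred order instances on List String give the same sort
theorem pv_sorted_inst (X : List (List String)) :
    @PySem.List.sorted (List String) (List String) List.instLT (fun a b => a.decidableLT b)
      X (fun x => x) false
    = @PySem.List.sorted (List String) (List String) List.instLinearOrder.toLT
      LinearOrder.toDecidableLT X (fun x => x) false := by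
  congr 1

-- ===== VERDICT (by name: the statement is the Claim_ definition above) =====
theorem create_C1_spec : Claim_equal_create_C1 := by
  intro dataset _
  unfold Spec_create_C1
  simp only [create_C1, create_C1_alt]
  rw [show dataset.foldl (fun acc t => acc ++ t) ([] : List String) = dataset.flatten from
    by simpa using pv_flatten_foldl dataset []]
  rw [show dataset.foldl (fun C1 transaction =>
        transaction.foldl (fun C1 item =>
          if [item] ∈ C1 then C1 else C1 ++ [[item]]) C1) ([] : List (List String))
      = (dataset.flatten.foldl (fun L item => PySem.Set.add L item) []).map (fun s => [s]) from
    by simpa using pv_buildA dataset []]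
  rw [show dataset.flatten.foldl (fun L item => PySem.Set.add L item) []
      = PySem.Set.ofList dataset.flatten from (PySem.Set.ofList_eq_foldl _).symm]
  have hsortedB : (PySem.List.sorted dataset.flatten (fun x => x) false).Pairwise
      (fun a b => a ≤ b) := PySem.List.sorted_pairwise dataset.flatten (fun x => x)
  obtain ⟨r, h1, h2, h3⟩ := pv_coalesce_none _ hsortedB
  rw [h1]
  have hperm : (r.map (fun x => ([x] : List String))).Perm
      ((PySem.Set.ofList dataset.flatten).map (fun s => [s])) := by
    refine List.Perm.map _ ?_
    refine (List.perm_ext_iff_of_nodup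
      (h2.imp (fun h => ne_of_lt h)) (PySem.Set.nodup_ofList dataset.flatten)).mpr ?_
    intro x
    rw [h3 x, PySem.List.mem_sorted, PySem.Set.mem_ofList]
  have hpw : (r.map (fun x => ([x] : List String))).Pairwise (fun a b => a < b) := by
    rw [List.pairwise_map]
    exact h2.imp (fun h => pv_singleton_lt.mpr h)
  rw [pv_sorted_inst, PySem.List.sorted_eq_of_perm_of_pairwise_lt _ _ _ hperm hpw]
  rw [List.map_map]
  simp [Function.comp, show ∀ x : String, PySem.Set.ofList [x] = [x] from fun x => rfl]
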